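-- pv_equiv track=rewrite | github.com/robhaswell/PartyLaps | apps/python/PartyLaps/PartyLaps.py | cycleDriver
-- ===== SOURCE A (Python) =====
-- def cycleDriver(drivers, currentDriver):
--     """
--     Return the next driver in the drivers list, or the first driver if it is
--     not found.
--     """
--     if not drivers:
--         return ""
--     returnNow = False
--     for driver in drivers:
--         if returnNow:
--             return driver
--         if driver == currentDriver:
--             returnNow = True
--     return drivers[0]
-- ===== SOURCE B (Python) =====
-- def cycleDriver(drivers, currentDriver):
--     """
--     Return the next driver in the drivers list, or the first driver if it is
--     not found.
--     """
--     if not drivers: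
--         return ""
--     succ = {}
--     for cur, nxt in zip(drivers, drivers[1:] + drivers[:1]):
--         succ.setdefault(cur, nxt)
--     return succ.get(currentDriver, drivers[0])
-- ===== Notes on version B (the rewrite author's own statement) =====
-- stated objective: alternative
-- what changed: Instead of scanning with a boolean flag, B precomputes a successor dictionary by zipping the list with its rotation (drivers[1:] + drivers[:1]) via setdefault (first occurrence wins), then answers with a single dict lookup defaulting to drivers[0].
import Mathlib
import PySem

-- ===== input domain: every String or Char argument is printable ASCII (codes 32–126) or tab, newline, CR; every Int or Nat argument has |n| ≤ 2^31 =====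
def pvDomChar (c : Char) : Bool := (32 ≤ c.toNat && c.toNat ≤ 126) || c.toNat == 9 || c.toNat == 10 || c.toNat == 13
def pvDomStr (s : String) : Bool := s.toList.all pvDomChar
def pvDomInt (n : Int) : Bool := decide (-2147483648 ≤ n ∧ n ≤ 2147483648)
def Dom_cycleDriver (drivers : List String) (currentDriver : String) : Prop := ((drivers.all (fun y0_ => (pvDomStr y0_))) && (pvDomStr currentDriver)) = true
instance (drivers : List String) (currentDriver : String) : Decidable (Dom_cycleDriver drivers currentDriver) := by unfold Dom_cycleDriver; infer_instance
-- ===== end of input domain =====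

-- B replaces A's boolean-flag scan by precomputing a cyclic-successor dictionary
-- (zip the list with its rotation, setdefault so the first occurrence wins) and one
-- dict lookup with default drivers[0] (alternative; same cost).

-- ===== PORT A =====
-- the 'for driver in drivers' loop with the returnNow flag; 'none' = fell through the loop
def cycleDriverLoop (xs : List String) (currentDriver : String) (returnNow : Bool) : Option String :=
  match xs with
  | [] => none
  | driver :: rest =>
      if returnNow then some driver
      else if driver == currentDriver then cycleDriverLoop rest currentDriver true
      else cycleDriverLoop rest currentDriver returnNow

def cycleDriver (drivers : List String) (currentDriver : String) : String :=
  if drivers.isEmpty then ""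
  else
    match cycleDriverLoop drivers currentDriver false with
    | some driver => driver
    | none => (PySem.List.pyGet? drivers 0).getD ""  -- return drivers[0] (in range: list nonempty)

-- ===== PORT B =====
def cycleDriver_alt (drivers : List String) (currentDriver : String) : String :=
  if drivers.isEmpty then ""
  else
    -- succ = setdefault-fold over zip(drivers, drivers[1:] + drivers[:1]); then succ.get(currentDriver, drivers[0])
    ((drivers.zip (PySem.List.slice drivers (some (1 : Int)) none
          ++ PySem.List.slice drivers none (some (1 : Int)))).foldl
        (fun d p => d.setdefault p.1 p.2) PySem.Dict.empty).getD
      currentDriver ((PySem.List.pyGet? drivers 0).getD "")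

-- ===== PRECONDITION & SPEC =====
def Spec_cycleDriver (drivers : List String) (currentDriver : String) (out : String) : Prop := out = cycleDriver_alt drivers currentDriver
instance (drivers : List String) (currentDriver : String) (out : String) : Decidable (Spec_cycleDriver drivers currentDriver out) := by unfold Spec_cycleDriver; infer_instance

-- ===== CLAIM (what is proved, stated in full; the proofs are below) =====
def Claim_equal_cycleDriver : Prop := ∀ (drivers : List String) (currentDriver : String), Dom_cycleDriver drivers currentDriver → Spec_cycleDriver drivers currentDriver (cycleDriver drivers currentDriver)

-- ===== LEMMAS AND PROOFS =====

theorem cycleDriverLoop_true (xs : List String) (c : String) :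
    cycleDriverLoop xs c true = xs.head? := by
  cases xs <;> simp [cycleDriverLoop]

theorem cycleDriverLoop_false (xs : List String) (c : String) :
    cycleDriverLoop xs c false = (PySem.List.index? xs c).bind (fun i => xs[i + 1]?) := by
  induction xs with
  | nil => simp [cycleDriverLoop, PySem.List.index?]
  | cons d rest ih =>
    by_cases hd : d = c
    · subst hd
      rw [PySem.List.index?_cons_self]
      simp [cycleDriverLoop, cycleDriverLoop_true, List.head?_eq_getElem?]
    · rw [PySem.List.index?_cons_of_ne _ hd]
      simp only [cycleDriverLoop, beq_iff_eq, hd, if_false, if_neg (Bool.false_ne_true), ih,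
        Option.bind_map]
      cases PySem.List.index? rest c with
      | none => rfl
      | some i => simp

-- get? of a dict built by setdefault-folding an association list: old binding wins,
-- otherwise the FIRST matching pair of the list
theorem get?_foldl_setdefault (l : List (String × String)) (d : PySem.Dict String String)
    (k : String) :
    (l.foldl (fun d p => d.setdefault p.1 p.2) d).get? k
      = (d.get? k).or (l.lookup k) := by
  induction l generalizing d with
  | nil => simp
  | cons p rest ih =>
    obtain ⟨a, b⟩ := p
    rw [List.foldl_cons, ih]
    by_cases ha : a = k
    · subst ha
      rw [PySem.Dict.get?_setdefault_self]
      cases hdk : d.get? a with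
      | some v => simp [List.lookup]
      | none => simp [List.lookup]
    · have hba : (k == a) = false := by simp [Ne.symm ha]
      rw [PySem.Dict.get?_setdefault_of_ne _ _ (Ne.symm ha)]
      simp [List.lookup, hba]

-- first-match lookup in a zip = index of the key in the firsts, read off the seconds
theorem lookup_zip (xs ys : List String) (c : String) (h : xs.length ≤ ys.length) :
    List.lookup c (xs.zip ys) = (PySem.List.index? xs c).bind (fun i => ys[i]?) := by
  induction xs generalizing ys with
  | nil => simp [PySem.List.index?]
  | cons x xs ih =>
    cases ys with
    | nil => simp at h
    | cons y ys =>
      by_cases hx : x = c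
      · subst hx
        rw [PySem.List.index?_cons_self]
        simp
      · have hbc : (c == x) = false := by simp [Ne.symm hx]
        rw [PySem.List.index?_cons_of_ne _ hx]
        have := ih ys (by simpa using Nat.le_of_succ_le_succ h)
        simp only [List.zip_cons_cons, List.lookup, hbc, this, Option.bind_map]
        cases PySem.List.index? xs c with
        | none => rfl
        | some i => simp

theorem cycleDriver_spec_aux (drivers : List String) (currentDriver : String) :
    cycleDriver drivers currentDriver = cycleDriver_alt drivers currentDriver := by
  unfold cycleDriver cycleDriver_alt
  cases drivers with
  | nil => simp
  | cons d0 rest =>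
    have hrot : PySem.List.slice (d0 :: rest) (some (1 : Int)) none
        ++ PySem.List.slice (d0 :: rest) none (some (1 : Int)) = rest ++ [d0] := by
      rw [show ((1 : Int)) = ((1 : Nat) : Int) by norm_num,
        PySem.List.slice_from_natCast, PySem.List.slice_to_natCast]
      simp
    simp only [List.isEmpty_cons, Bool.false_eq_true, if_false]
    rw [cycleDriverLoop_false, hrot, PySem.Dict.getD_eq_get?_getD,
      get?_foldl_setdefault, PySem.Dict.get?_empty, Option.none_or,
      lookup_zip _ _ _ (by simp)]
    cases hidx : PySem.List.index? (d0 :: rest) currentDriver with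
    | none => rfl
    | some i =>
      obtain ⟨hk, -, -⟩ := PySem.List.getElem_of_index?_eq_some hidx
      by_cases hlast : i = rest.length
      · subst hlast
        simp
      · have hlt : i < rest.length := by simp at hk; omega
        have h1 : (rest ++ [d0])[i]? = rest[i]? := List.getElem?_append_left hlt
        simp [h1, List.getElem?_eq_getElem hlt]

-- ===== VERDICT (by name: the statement is the Claim_ definition above) =====
theorem cycleDriver_spec : Claim_equal_cycleDriver := by
  intro drivers currentDriver _
  unfold Spec_cycleDriver
  exact cycleDriver_spec_aux drivers currentDriver
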